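-- pv_equiv track=rewrite | github.com/cyberus-technology/virtualbox-kvm | src/VBox/VMM/VMMAll/IEMAllInstructionsPython.py | __checkIfShortTable
-- ===== SOURCE A (Python) =====
-- def __checkIfShortTable(aoTableOrdered, oMap):
--     """
--     Returns (iInstr, cInstructions, fShortTable)
--     """
--
--     # Determin how much we can trim off.
--     cInstructions = len(aoTableOrdered);
--     while cInstructions > 0 and aoTableOrdered[cInstructions - 1] is None:
--         cInstructions -= 1;
--
--     iInstr = 0;
--     while iInstr < cInstructions and aoTableOrdered[iInstr] is None:
--         iInstr += 1;
--
--     # If we can save more than 30%, we go for the short table version.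
--     if iInstr + len(aoTableOrdered) - cInstructions >= len(aoTableOrdered) // 30:
--         return (iInstr, cInstructions, True);
--     _ = oMap; # Use this for overriding.
--
--     # Output the full table.
--     return (0, len(aoTableOrdered), False);
-- ===== SOURCE B (Python) =====
-- def __checkIfShortTable(aoTableOrdered, oMap):
--     """
--     Returns (iInstr, cInstructions, fShortTable)
--     """
--     # Single forward pass: first and last non-None indices.
--     iFirst = iLast = None
--     for i, oEntry in enumerate(aoTableOrdered):
--         if oEntry is not None:
--             if iFirst is None:
--                 iFirst = i
--             iLast = i
--     if iFirst is None:
--         iInstr, cInstructions = 0, 0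
--     else:
--         iInstr, cInstructions = iFirst, iLast + 1
--     if iInstr + len(aoTableOrdered) - cInstructions >= len(aoTableOrdered) // 30:
--         return (iInstr, cInstructions, True)
--     _ = oMap
--     return (0, len(aoTableOrdered), False)
-- ===== Notes on version B (the rewrite author's own statement) =====
-- stated objective: simpler
-- what changed: Replaces A's two end-anchored trimming while-loops (backward from the end, then forward up to the trim point) with a single forward pass that records the first and last non-None indices, from which the trim bounds follow directly.
import Mathlib
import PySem

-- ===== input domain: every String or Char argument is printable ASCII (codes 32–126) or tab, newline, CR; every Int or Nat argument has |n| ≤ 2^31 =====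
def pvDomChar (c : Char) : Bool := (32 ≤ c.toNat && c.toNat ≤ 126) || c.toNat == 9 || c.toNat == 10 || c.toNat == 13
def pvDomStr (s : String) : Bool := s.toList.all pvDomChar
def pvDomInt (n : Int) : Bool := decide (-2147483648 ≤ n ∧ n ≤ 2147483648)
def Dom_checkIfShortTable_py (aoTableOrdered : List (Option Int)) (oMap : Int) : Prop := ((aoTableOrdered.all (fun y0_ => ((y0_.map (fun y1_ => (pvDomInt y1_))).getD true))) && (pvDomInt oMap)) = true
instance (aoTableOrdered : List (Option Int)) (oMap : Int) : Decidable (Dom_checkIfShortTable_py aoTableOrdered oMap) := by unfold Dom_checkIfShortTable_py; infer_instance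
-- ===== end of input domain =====

-- B replaces A's two end-anchored trimming while-loops by one forward pass collecting the
-- first and last non-None indices (objective: simpler, same O(n) cost).
-- ===== PORT A =====
-- A's first while loop: decrement cInstructions while the element before it is None.
def aTrimTail (xs : List (Option Int)) : Nat → Nat
  | 0 => 0
  | c + 1 => if xs.getD c (some 0) = none then aTrimTail xs c else c + 1

-- A's second while loop: advance iInstr over leading None entries below cInstructions.
def aTrimHead (xs : List (Option Int)) (c : Nat) (i : Nat) : Nat :=
  if i < c ∧ xs.getD i (some 0) = none then aTrimHead xs c (i + 1) else i
termination_by c - i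

def checkIfShortTable_py (aoTableOrdered : List (Option Int)) (oMap : Int) : Int × Int × Bool :=
  let n := aoTableOrdered.length
  let cInstructions := aTrimTail aoTableOrdered n
  let iInstr := aTrimHead aoTableOrdered cInstructions 0
  if (iInstr : Int) + (n : Int) - (cInstructions : Int) ≥ PySem.Int.floordiv (n : Int) 30 then
    ((iInstr : Int), (cInstructions : Int), true)
  else
    (0, (n : Int), false)

-- ===== PORT B =====
-- B's single for-loop over enumerate: track first and last non-None indices.
def bScan : List (Option Int) → Nat → Option Nat → Option Nat → Option Nat × Option Nat
  | [], _, iFirst, iLast => (iFirst, iLast)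
  | x :: t, i, iFirst, iLast =>
    if x ≠ none then
      bScan t (i + 1) (if iFirst = none then some i else iFirst) (some i)
    else
      bScan t (i + 1) iFirst iLast

def checkIfShortTable_py_alt (aoTableOrdered : List (Option Int)) (oMap : Int) : Int × Int × Bool :=
  let n := aoTableOrdered.length
  let fl := bScan aoTableOrdered 0 none none
  let ic : Nat × Nat :=
    match fl.1, fl.2 with
    | some j, some k => (j, k + 1)
    | _, _ => (0, 0)
  if (ic.1 : Int) + (n : Int) - (ic.2 : Int) ≥ PySem.Int.floordiv (n : Int) 30 then
    ((ic.1 : Int), (ic.2 : Int), true)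
  else
    (0, (n : Int), false)

-- ===== PRECONDITION & SPEC =====
def Spec_checkIfShortTable_py (aoTableOrdered : List (Option Int)) (oMap : Int) (out : Int × Int × Bool) : Prop := out = checkIfShortTable_py_alt aoTableOrdered oMap
instance (aoTableOrdered : List (Option Int)) (oMap : Int) (out : Int × Int × Bool) : Decidable (Spec_checkIfShortTable_py aoTableOrdered oMap out) := by unfold Spec_checkIfShortTable_py; infer_instance

-- ===== CLAIM (what is proved, stated in full; the proofs are below) =====
def Claim_equal_checkIfShortTable_py : Prop := ∀ (aoTableOrdered : List (Option Int)) (oMap : Int), Dom_checkIfShortTable_py aoTableOrdered oMap → Spec_checkIfShortTable_py aoTableOrdered oMap (checkIfShortTable_py aoTableOrdered oMap)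

-- ===== LEMMAS AND PROOFS =====

-- spec helpers (proof-only): first / last non-None index
def ffind : List (Option Int) → Option Nat
  | [] => none
  | x :: t => if x ≠ none then some 0 else (ffind t).map (· + 1)

def lfind : List (Option Int) → Option Nat
  | [] => none
  | x :: t =>
    match lfind t with
    | some k => some (k + 1)
    | none => if x ≠ none then some 0 else none

theorem lfind_lt_length : ∀ (xs : List (Option Int)) (k : Nat), lfind xs = some k → k < xs.length := by
  intro xs
  induction xs with
  | nil => intro k h; simp [lfind] at h
  | cons x t ih =>
    intro k h
    simp only [lfind] at h
    cases hl : lfind t with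
    | some m =>
      rw [hl] at h; have := ih m hl; simp at h
      simp only [List.length_cons]; omega
    | none =>
      rw [hl] at h
      by_cases hx : x = none
      · simp [hx] at h
      · simp [hx] at h
        simp only [List.length_cons]; omega

theorem ffind_none_iff : ∀ (xs : List (Option Int)), ffind xs = none ↔ lfind xs = none := by
  intro xs
  induction xs with
  | nil => simp [ffind, lfind]
  | cons x t ih =>
    by_cases hx : x = none <;> cases hl : lfind t <;>
      simp [ffind, lfind, hx, hl, ih]

theorem ffind_le_lfind : ∀ (xs : List (Option Int)) (j k : Nat), ffind xs = some j → lfind xs = some k → j ≤ k := by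
  intro xs
  induction xs with
  | nil => intro j k hj _; simp [ffind] at hj
  | cons x t ih =>
    intro j k hj hk
    by_cases hx : x = none
    · simp only [ffind, hx, ne_eq, not_true_eq_false, if_false] at hj
      cases hf : ffind t with
      | none => rw [hf] at hj; simp at hj
      | some j' =>
        rw [hf] at hj; simp at hj
        simp only [lfind] at hk
        cases hl : lfind t with
        | none => rw [(ffind_none_iff t).2 hl] at hf; simp at hf
        | some k' =>
          rw [hl] at hk; simp at hk
          have := ih j' k' hf hl
          omega
    · simp [ffind, hx] at hj
      omega

theorem lfind_append_single (ys : List (Option Int)) (a : Option Int) :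
    lfind (ys ++ [a]) = if a ≠ none then some ys.length else lfind ys := by
  induction ys with
  | nil =>
    by_cases ha : a = none <;> simp [lfind, ha]
  | cons y t ih =>
    by_cases ha : a = none
    · subst ha
      simp only [List.cons_append, lfind, ih]
      simp
    · simp only [List.cons_append, lfind, ih, ha, ne_eq, not_false_eq_true, if_true]
      simp [lfind]

-- A's tail loop computes the trimmed length of the first c elements.
theorem aTrimTail_eq : ∀ (xs : List (Option Int)) (c : Nat), c ≤ xs.length →
    aTrimTail xs c = (match lfind (xs.take c) with | some k => k + 1 | none => 0) := by
  intro xs c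
  induction c with
  | zero => intro _; simp [aTrimTail, lfind]
  | succ c ih =>
    intro hc
    have hlt : c < xs.length := by omega
    have htake : xs.take (c + 1) = xs.take c ++ [xs[c]] := by
      rw [List.take_add_one, List.getElem?_eq_getElem hlt]
      simp
    have hgetD : xs.getD c (some 0) = xs[c] := List.getD_eq_getElem xs _ hlt
    have hlen : (xs.take c).length = c := by
      simp [List.length_take]; omega
    by_cases hx : xs[c] = none
    · rw [aTrimTail, hgetD, if_pos hx, ih (by omega), htake, lfind_append_single]
      simp [hx]
    · rw [aTrimTail, hgetD, if_neg hx, htake, lfind_append_single]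
      simp [hx, hlen]

-- A's head loop finds the first non-None index at or after i, capped at c.
theorem aTrimHead_eq : ∀ (xs : List (Option Int)) (c i : Nat), i ≤ c → c ≤ xs.length →
    aTrimHead xs c i = (match ffind (xs.drop i) with | some d => min (i + d) c | none => c) := by
  intro xs c i
  induction hi : c - i using Nat.strong_induction_on generalizing i with
  | _ n ihn =>
  intro hic hcl
  by_cases h : i < c
  · have hil : i < xs.length := by omega
    have hdrop : xs.drop i = xs[i] :: xs.drop (i + 1) := List.drop_eq_getElem_cons hil
    have hgetD : xs.getD i (some 0) = xs[i] := List.getD_eq_getElem xs _ hil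
    by_cases hx : xs[i] = none
    · have hcond : i < c ∧ xs.getD i (some 0) = none := ⟨h, by rw [hgetD]; exact hx⟩
      rw [aTrimHead, if_pos hcond,
        ihn (c - (i + 1)) (by omega) (i + 1) rfl (by omega) hcl, hdrop]
      simp only [ffind, hx, ne_eq, not_true_eq_false, if_false]
      cases hf : ffind (xs.drop (i + 1)) with
      | none => simp [hf]
      | some d =>
        simp [hf]
        congr 1
        omega
    · have hcond : ¬(i < c ∧ xs.getD i (some 0) = none) := by
        rw [hgetD]; exact fun hco => hx hco.2
      rw [aTrimHead, if_neg hcond, hdrop]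
      simp only [ffind, hx, ne_eq, not_false_eq_true, if_true]
      rw [Nat.add_zero, Nat.min_eq_left (Nat.le_of_lt h)]
  · have hcond : ¬(i < c ∧ xs.getD i (some 0) = none) := fun hco => h hco.1
    rw [aTrimHead, if_neg hcond]
    have hie : i = c := by omega
    cases hf : ffind (xs.drop i) with
    | none => simp [hf, hie]
    | some d =>
      simp [hf]
      rw [hie, Nat.min_eq_right (Nat.le_add_right c d)]

-- B's scan in terms of ffind / lfind.
theorem bScan_eq : ∀ (xs : List (Option Int)) (i : Nat) (f l : Option Nat),
    bScan xs i f l =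
      ((match ffind xs with | none => f | some j => if f = none then some (i + j) else f),
       (match lfind xs with | none => l | some k => some (i + k))) := by
  intro xs
  induction xs with
  | nil => intro i f l; simp [bScan, ffind, lfind]
  | cons x t ih =>
    intro i f l
    by_cases hx : x = none
    · simp only [bScan, hx, ne_eq, not_true_eq_false, if_false]
      rw [ih]
      simp only [ffind, lfind, hx, ne_eq, not_true_eq_false, if_false, Prod.mk.injEq]
      refine ⟨?_, ?_⟩
      · cases hf : ffind t with
        | none => simp
        | some j => cases f <;> simp <;> omega
      · cases hl : lfind t with
        | none => simp
        | some k => simp; omega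
    · simp only [bScan, hx, ne_eq, not_false_eq_true, if_true]
      rw [ih]
      simp only [ffind, lfind, hx, ne_eq, not_false_eq_true, if_true, Prod.mk.injEq]
      refine ⟨?_, ?_⟩
      · cases hf : ffind t with
        | none => cases f <;> simp
        | some j => cases f <;> simp
      · cases hl : lfind t with
        | none => simp
        | some k => simp; omega

-- ===== VERDICT (by name: the statement is the Claim_ definition above) =====
theorem checkIfShortTable_py_spec : Claim_equal_checkIfShortTable_py := by
  intro xs oMap _
  unfold Spec_checkIfShortTable_py
  simp only [checkIfShortTable_py, checkIfShortTable_py_alt, bScan_eq]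
  have hT := aTrimTail_eq xs xs.length (le_refl _)
  rw [List.take_length] at hT
  cases hl : lfind xs with
  | none =>
    rw [hl] at hT
    simp only at hT
    have hf : ffind xs = none := (ffind_none_iff xs).2 hl
    have hH : aTrimHead xs 0 0 = 0 := by
      rw [aTrimHead]; simp
    rw [hT, hH]
    simp
  | some k =>
    rw [hl] at hT
    simp only at hT
    cases hf : ffind xs with
    | none => rw [(ffind_none_iff xs).1 hf] at hl; simp at hl
    | some j =>
      have hjk : j ≤ k := ffind_le_lfind xs j k hf hl
      have hkl : k < xs.length := lfind_lt_length xs k hl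
      have hH : aTrimHead xs (k + 1) 0 = j := by
        rw [aTrimHead_eq xs (k + 1) 0 (Nat.zero_le _) (by omega)]
        rw [List.drop_zero, hf]
        simp only [Nat.zero_add]
        exact Nat.min_eq_left (by omega)
      rw [hT, hH]
      simp [Nat.zero_add]
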